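-- pv_equiv track=rewrite | github.com/liansanbao/Python | WLW/action/PlateFundAction.py | rotate_text_90
-- ===== SOURCE A (Python) =====
-- def rotate_text_90(text):
--     """顺时针旋转90度打印"""
--     max_len = max(len(line) for line in text.split('\n'))
--     rotated = []
--     for i in range(max_len):
--         rotated_line = ''.join([
--             line[i] if i < len(line) else ' '
--             for line in reversed(text.split('\n'))
--         ])
--         rotated.append(rotated_line)
--     return '\n'.join(rotated)
-- ===== SOURCE B (Python) =====
-- def rotate_text_90(text):
--     """顺时针旋转90度打印"""
--     cols = []          # cols[j] accumulates output row j, newest line prepended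
--     seen = 0           # number of lines consumed so far
--     for line in text.split('\n'):
--         if len(line) > len(cols):
--             cols.extend([' ' * seen] * (len(line) - len(cols)))
--         cols = [(line[j] if j < len(line) else ' ') + col
--                 for j, col in enumerate(cols)]
--         seen += 1
--     return '\n'.join(cols)
-- ===== Notes on version B (the rewrite author's own statement) =====
-- stated objective: alternative
-- what changed: Single incremental pass over the lines with an accumulator of output rows (growing the row list with blank rows when a longer line appears and prepending each line's cells), instead of A's precomputed max_len and per-column loop that re-splits the whole text and rebuilds the reversed line list for every column.
import Mathlib
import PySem

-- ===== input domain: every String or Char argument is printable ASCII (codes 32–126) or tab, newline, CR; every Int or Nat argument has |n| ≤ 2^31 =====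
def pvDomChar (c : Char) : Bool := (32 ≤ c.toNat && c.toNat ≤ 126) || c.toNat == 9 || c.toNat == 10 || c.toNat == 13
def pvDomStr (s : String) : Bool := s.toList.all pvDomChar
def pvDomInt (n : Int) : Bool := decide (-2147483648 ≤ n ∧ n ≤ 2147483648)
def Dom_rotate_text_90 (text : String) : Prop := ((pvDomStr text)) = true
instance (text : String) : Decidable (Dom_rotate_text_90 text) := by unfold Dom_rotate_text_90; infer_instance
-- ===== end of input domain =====

-- B replaces A's two-phase column-index loop (precompute max_len, then rebuild the
-- reversed line list per column) by a single pass over the lines that grows and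
-- prepends onto the output rows incrementally; alternative decomposition, same value.

-- max(...) over a (nonempty) sequence of lengths, Python primitive used by A
def pyMaxLen (xs : List (List Char)) : Nat := xs.foldl (fun acc l => Nat.max acc l.length) 0

-- ===== PORT A =====
-- literal port: for i in range(max_len): build the column from reversed(text.split('\n')),
-- taking line[i] when i < len(line) else ' '; ''.join over single chars is the char list itself
def rotate_text_90 (text : String) : String :=
  let lines := PySem.Chars.splitOn text.toList ['\n']
  let maxLen := pyMaxLen lines
  let rotated := (List.range maxLen).foldl
    (fun acc i =>
      acc ++ [lines.reverse.map (fun line => if i < line.length then line.getD i ' ' else ' ')])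
    []
  String.ofList (PySem.Chars.join ['\n'] rotated)

-- ===== PORT B =====
-- one loop body of Source B: grow cols with blank rows (' ' * seen) when the line is longer,
-- then prepend this line's cell onto every row via enumerate; seen increments
def stepB (st : List (List Char) × Nat) (line : List Char) : List (List Char) × Nat :=
  let cols := if st.1.length < line.length
    then st.1 ++ List.replicate (line.length - st.1.length) (List.replicate st.2 ' ')
    else st.1
  ((PySem.List.enumerate cols 0).map
     (fun p => (if p.1 < (line.length : Int) then PySem.List.pyGetD line p.1 ' ' else ' ') :: p.2),
   st.2 + 1)

def rotate_text_90_alt (text : String) : String :=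
  let lines := PySem.Chars.splitOn text.toList ['\n']
  let st := lines.foldl stepB ([], 0)
  String.ofList (PySem.Chars.join ['\n'] st.1)

-- ===== PRECONDITION & SPEC =====
def Spec_rotate_text_90 (text : String) (out : String) : Prop := out = rotate_text_90_alt text
instance (text : String) (out : String) : Decidable (Spec_rotate_text_90 text out) := by unfold Spec_rotate_text_90; infer_instance

-- ===== CLAIM =====
def Claim_equal_rotate_text_90 : Prop := ∀ (text : String), Dom_rotate_text_90 text → Spec_rotate_text_90 text (rotate_text_90 text)

-- ===== LEMMAS AND PROOFS =====

-- A's cell at column i of a line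
def cellAt (i : Nat) (line : List Char) : Char :=
  if i < line.length then line.getD i ' ' else ' '

-- the columns A computes for a processed prefix ps of the line list
def colsOf (ps : List (List Char)) : List (List Char) :=
  (List.range (pyMaxLen ps)).map (fun i => ps.reverse.map (cellAt i))

theorem length_le_pyMaxLen (xs : List (List Char)) (l : List Char) (hl : l ∈ xs) :
    l.length ≤ pyMaxLen xs :=
  (PySem.List.le_foldl_max_nat xs List.length 0).2 l hl

theorem pyMaxLen_append_singleton (ps : List (List Char)) (l : List Char) :
    pyMaxLen (ps ++ [l]) = Nat.max (pyMaxLen ps) l.length := by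
  unfold pyMaxLen
  rw [List.foldl_append]
  simp

-- mapping a prepend over the enumerate of a range-map is a range-map again
theorem map_enumerate_range (n : Nat) (f : Nat → List Char) (g : Int → Char) :
    (PySem.List.enumerate ((List.range n).map f) 0).map (fun p => g p.1 :: p.2)
      = (List.range n).map (fun i : Nat => g (Int.ofNat i) :: f i) := by
  apply List.ext_getElem
  · simp [PySem.List.length_enumerate]
  · intro k h1 h2
    simp only [List.getElem_map, PySem.List.getElem_enumerate, List.getElem_range]
    simp

-- padding rows beyond the current max are all blank
theorem colsOf_pad (ps : List (List Char)) (w : Nat) (hw : pyMaxLen ps ≤ w) :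
    colsOf ps ++ List.replicate (w - pyMaxLen ps) (List.replicate ps.length ' ')
      = (List.range w).map (fun i => ps.reverse.map (cellAt i)) := by
  unfold colsOf
  have hsplit : w = pyMaxLen ps + (w - pyMaxLen ps) := by omega
  rw [hsplit, List.range_add, List.map_append]
  congr 1
  rw [List.map_map]
  have : ∀ j, ps.reverse.map (cellAt (pyMaxLen ps + j)) = List.replicate ps.length ' ' := by
    intro j
    have : ∀ l ∈ ps.reverse, cellAt (pyMaxLen ps + j) l = ' ' := by
      intro l hl
      have := length_le_pyMaxLen ps l (List.mem_reverse.mp hl)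
      unfold cellAt
      rw [if_neg (by omega)]
    rw [List.map_congr_left (fun l hl => this l hl)]
    simp [List.map_const']
  simp only [Function.comp_def, this]
  simp [List.map_const']

-- one step of B's loop advances A's column table by one processed line
theorem stepB_eq (ps : List (List Char)) (l : List Char) :
    stepB (colsOf ps, ps.length) l = (colsOf (ps ++ [l]), (ps ++ [l]).length) := by
  unfold stepB
  have hlen : (colsOf ps).length = pyMaxLen ps := by
    unfold colsOf; simp
  have hM' : pyMaxLen (ps ++ [l]) = Nat.max (pyMaxLen ps) l.length :=
    pyMaxLen_append_singleton ps l
  have hcols : (if (colsOf ps).length < l.length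
      then colsOf ps ++ List.replicate (l.length - (colsOf ps).length) (List.replicate ps.length ' ')
      else colsOf ps)
      = (List.range (pyMaxLen (ps ++ [l]))).map (fun i => ps.reverse.map (cellAt i)) := by
    rw [hlen, hM']
    split_ifs with h
    · have hmx : Nat.max (pyMaxLen ps) l.length = l.length := Nat.max_eq_right (le_of_lt h)
      rw [hmx]
      exact colsOf_pad ps l.length (le_of_lt h)
    · have hmx : Nat.max (pyMaxLen ps) l.length = pyMaxLen ps := Nat.max_eq_left (Nat.le_of_not_lt h)
      rw [hmx]
      rfl
  rw [hcols]
  refine Prod.ext ?_ (by simp)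
  simp only
  rw [map_enumerate_range (pyMaxLen (ps ++ [l])) (fun i => ps.reverse.map (cellAt i))
        (fun j => if j < (l.length : Int) then PySem.List.pyGetD l j ' ' else ' ')]
  unfold colsOf
  apply List.map_congr_left
  intro i _
  simp only [Int.ofNat_eq_natCast]
  have hcell : (if (i : Int) < (l.length : Int) then PySem.List.pyGetD l (i : Int) ' ' else ' ')
      = cellAt i l := by
    unfold cellAt
    by_cases h : i < l.length
    · rw [if_pos (by exact_mod_cast h), if_pos h, PySem.List.pyGetD_natCast]
    · rw [if_neg (by exact_mod_cast h), if_neg h]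
  rw [hcell]
  simp [cellAt]

-- the loop invariant: B's fold over the remaining lines extends A's column table
theorem loop_inv (rest : List (List Char)) :
    ∀ ps : List (List Char),
      rest.foldl stepB (colsOf ps, ps.length) = (colsOf (ps ++ rest), (ps ++ rest).length) := by
  induction rest with
  | nil => intro ps; simp
  | cons l rest ih =>
    intro ps
    rw [List.foldl_cons, stepB_eq ps l, ih (ps ++ [l])]
    simp

-- ===== VERDICT =====
theorem rotate_text_90_spec : Claim_equal_rotate_text_90 := by
  intro text _
  unfold Spec_rotate_text_90 rotate_text_90 rotate_text_90_alt
  simp only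
  congr 1
  have h0 : colsOf [] = ([] : List (List Char)) := by
    unfold colsOf pyMaxLen; simp
  have := loop_inv (PySem.Chars.splitOn text.toList ['\n']) []
  rw [h0] at this
  simp only [List.length_nil, List.nil_append] at this
  rw [this]
  rw [PySem.List.foldl_append_singleton_eq_map, List.nil_append]
  rfl
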